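-- pv_equiv track=rewrite | github.com/SakshamG7/E-LeetCode | Weekly/470/Q4.py | contains_zeros
-- ===== SOURCE A (Python) =====
-- def contains_zeros(n: int) -> bool:
--         if n == 0:
--             return True
--         while n > 0:
--             if n % 10 == 0:
--                 return True
--             n //= 10
--         return False
-- ===== SOURCE B (Python) =====
-- def contains_zeros(n: int) -> bool:
--     return n == 0 or (n > 0 and '0' in str(n))
-- ===== Notes on version B (the rewrite author's own statement) =====
-- stated objective: idiomatic
-- what changed: Replaces the arithmetic modulo/floor-divide digit loop with a loop-free scan of the decimal string representation ('0' in str(n)), keeping the n > 0 guard that mirrors the while-condition so negatives stay False.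
import Mathlib
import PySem

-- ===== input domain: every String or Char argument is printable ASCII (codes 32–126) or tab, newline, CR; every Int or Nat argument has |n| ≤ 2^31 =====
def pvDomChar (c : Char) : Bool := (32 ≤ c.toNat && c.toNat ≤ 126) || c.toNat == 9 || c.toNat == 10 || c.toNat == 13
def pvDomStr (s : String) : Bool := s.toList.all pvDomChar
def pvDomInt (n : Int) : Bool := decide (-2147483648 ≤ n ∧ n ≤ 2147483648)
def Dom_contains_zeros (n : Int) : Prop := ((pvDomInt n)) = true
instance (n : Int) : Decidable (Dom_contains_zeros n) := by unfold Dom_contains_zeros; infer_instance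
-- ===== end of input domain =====

-- B replaces A's modulo/floor-divide digit-extraction loop with a loop-free scan of the
-- decimal string representation ('0' in str(n)); the n > 0 guard mirrors A's while-condition
-- so negatives return False in both. Objective: idiomatic.

-- ===== PORT A =====
-- the 'while n > 0: if n % 10 == 0: return True; n //= 10' loop of A
def czLoopA (n : Int) : Bool :=
  if _h : n > 0 then
    (if PySem.Int.mod n 10 == 0 then true else czLoopA (PySem.Int.floordiv n 10))
  else false
termination_by n.toNat
decreasing_by
  rw [PySem.Int.floordiv_eq_ediv_of_pos (by norm_num)]
  omega

def contains_zeros (n : Int) : Bool :=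
  if n == 0 then true else czLoopA n

-- ===== PORT B =====
def contains_zeros_alt (n : Int) : Bool :=
  n == 0 || (decide (n > 0) && (PySem.Int.toChars n).contains '0')

-- ===== PRECONDITION & SPEC =====
def Spec_contains_zeros (n : Int) (out : Bool) : Prop := out = contains_zeros_alt n
instance (n : Int) (out : Bool) : Decidable (Spec_contains_zeros n out) := by unfold Spec_contains_zeros; infer_instance

-- ===== CLAIM (what is proved, stated in full; the proofs are below) =====
def Claim_equal_contains_zeros : Prop := ∀ (n : Int), Dom_contains_zeros n → Spec_contains_zeros n (contains_zeros n)

-- ===== LEMMAS AND PROOFS =====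

theorem digitChar_eq_zero_iff (d : Nat) (hd : d < 10) : (d.digitChar = '0') ↔ d = 0 := by
  interval_cases d <;> decide

theorem czLoopA_zero : czLoopA 0 = false := by
  rw [czLoopA]; rfl

theorem czLoopA_natCast (m : Nat) (hm : 0 < m) :
    czLoopA (m : Int) = decide ('0' ∈ Nat.toDigits 10 m) := by
  induction m using Nat.strong_induction_on with
  | _ m ih =>
    rw [czLoopA]
    have hpos : (m : Int) > 0 := by exact_mod_cast hm
    rw [dif_pos hpos]
    have hmod : PySem.Int.mod (m : Int) 10 = ((m % 10 : Nat) : Int) := by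
      rw [PySem.Int.mod_eq_emod_of_pos (by norm_num)]; omega
    have hdiv : PySem.Int.floordiv (m : Int) 10 = ((m / 10 : Nat) : Int) := by
      rw [PySem.Int.floordiv_eq_ediv_of_pos (by norm_num)]; omega
    rw [hmod, hdiv]
    by_cases hlt : m < 10
    · rw [Nat.toDigits_of_lt_base hlt]
      have h10 : m % 10 = m := Nat.mod_eq_of_lt hlt
      have hd0 : m / 10 = 0 := Nat.div_eq_of_lt hlt
      have hne : ¬ m.digitChar = '0' := by
        rw [digitChar_eq_zero_iff m hlt]; omega
      have hz : ¬ ((m % 10 : Nat) : Int) = 0 := by rw [h10]; omega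
      rw [if_neg (by simpa using hz), hd0]
      rw [show ((0:Nat):Int) = 0 from rfl, czLoopA_zero]
      simp only [List.mem_singleton]
      rw [decide_eq_false (fun h => hne (Eq.symm h))]
    · rw [Nat.toDigits_eq_if (by norm_num : 1 < 10), if_neg hlt]
      have hrec := ih (m / 10) (Nat.div_lt_self hm (by norm_num)) (by omega)
      have hmem : ('0' ∈ Nat.toDigits 10 (m / 10) ++ [(m % 10).digitChar])
          ↔ ('0' ∈ Nat.toDigits 10 (m / 10) ∨ (m % 10).digitChar = '0') := by
        simp [List.mem_append, eq_comm]
      by_cases hz : m % 10 = 0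
      · rw [if_pos (by simp [hz])]
        have hc : (m % 10).digitChar = '0' := by rw [hz]; rfl
        exact (decide_eq_true (hmem.mpr (Or.inr hc))).symm
      · have hzc : ¬ ((m % 10 : Nat) : Int) = 0 := by exact_mod_cast hz
        rw [if_neg (by simpa using hzc)]
        rw [hrec]
        have hne : ¬ (m % 10).digitChar = '0' := by
          rw [digitChar_eq_zero_iff _ (Nat.mod_lt _ (by norm_num))]; exact hz
        simp [hmem, hne]

theorem czLoopA_nonpos (n : Int) (h : ¬ n > 0) : czLoopA n = false := by
  rw [czLoopA, dif_neg h]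

-- ===== VERDICT (by name: the statement is the Claim_ definition above) =====
theorem contains_zeros_spec : Claim_equal_contains_zeros := by
  intro n _
  unfold Spec_contains_zeros contains_zeros contains_zeros_alt
  by_cases h0 : n = 0
  · simp [h0]
  · rw [if_neg (by simpa using h0)]
    by_cases hpos : n > 0
    · have hm : 0 < n.toNat := by omega
      have hcast : (n.toNat : Int) = n := by omega
      have := czLoopA_natCast n.toNat hm
      rw [hcast] at this
      rw [this]
      simp [PySem.Int.toChars, h0, hpos, Int.not_lt.mpr (le_of_lt hpos)]
    · rw [czLoopA_nonpos n hpos]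
      simp [h0, hpos]
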